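-- pv_equiv track=rewrite | github.com/Frihet/webwidgets | Utils/Widget/CssClass.py | classes_to_css_classes
-- ===== SOURCE A (Python) =====
-- def classes_to_css_classes(classes, postfix = []):
--     if postfix:
--         postfix = ['', '_'] + postfix
--     cls_set = set(classes)
--     if len(cls_set) != len(classes):
--         res = []
--         for cls in reversed(classes):
--             if cls in cls_set:
--                 res.append(cls)
--                 cls_set.remove(cls)
--         classes = reversed(res)
--     return ' '.join([c.replace('.', '-') + '-'.join(postfix)
--                      for c in classes])
-- ===== SOURCE B (Python) =====
-- def classes_to_css_classes(classes, postfix = []):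
--     suffix = '-'.join(['', '_'] + postfix) if postfix else ''
--     return ' '.join(c.replace('.', '-') + suffix
--                     for i, c in enumerate(classes) if c not in classes[i+1:])
-- ===== Notes on version B (the rewrite author's own statement) =====
-- stated objective: alternative
-- what changed: B computes the suffix once and dedups with a single forward scan keeping an element iff it does not reappear in the remaining tail (keep-last-occurrence by tail membership), instead of A's reverse pass with a mutated set of pending classes and a conditional dedup branch.
import Mathlib
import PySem

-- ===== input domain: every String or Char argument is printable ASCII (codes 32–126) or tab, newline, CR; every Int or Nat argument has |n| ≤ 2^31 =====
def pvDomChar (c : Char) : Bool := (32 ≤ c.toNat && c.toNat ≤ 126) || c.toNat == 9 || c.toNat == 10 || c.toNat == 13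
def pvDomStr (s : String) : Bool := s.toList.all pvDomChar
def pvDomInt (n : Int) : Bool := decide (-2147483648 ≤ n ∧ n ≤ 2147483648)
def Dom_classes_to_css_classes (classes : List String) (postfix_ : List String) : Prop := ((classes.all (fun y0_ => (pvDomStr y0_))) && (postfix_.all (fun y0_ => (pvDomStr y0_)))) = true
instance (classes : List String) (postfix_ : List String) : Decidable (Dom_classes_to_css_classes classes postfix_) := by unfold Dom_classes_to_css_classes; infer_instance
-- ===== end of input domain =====

-- B computes the suffix once and dedups by a single forward scan keeping a class
-- iff it does not reappear later (keep-last by tail membership); no reversal, no set.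

-- ===== PORT A =====
-- the for-loop over reversed(classes): state is (res, cls_set); cls_set.remove(cls) is
-- guarded by 'cls in cls_set', so Set.discard is exact here
def dedupLoopA : List String → PySem.Set String → List String → List String
  | [], _, res => res
  | cls :: rest, s, res =>
      if PySem.Set.contains s cls then
        dedupLoopA rest (PySem.Set.discard s cls) (res ++ [cls])
      else
        dedupLoopA rest s res

def classes_to_css_classes (classes : List String) (postfix_ : List String) : String :=
  let p := if postfix_ ≠ [] then ["", "_"] ++ postfix_ else postfix_
  let clsSet : PySem.Set String := PySem.Set.ofList classes
  let classes' :=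
    if PySem.Set.len clsSet ≠ classes.length then
      (dedupLoopA classes.reverse clsSet []).reverse
    else classes
  PySem.Str.join " " (classes'.map (fun c => PySem.Str.replace c "." "-" ++ PySem.Str.join "-" p))

-- ===== PORT B =====
-- Source B's filter 'c not in classes[i+1:]' ported as structural recursion on the list:
-- at head c with tail rest, classes[i+1:] IS rest, so the test is rest.contains c (exact)
def keepLastB : List String → List String
  | [] => []
  | c :: rest => if rest.contains c then keepLastB rest else c :: keepLastB rest

def classes_to_css_classes_alt (classes : List String) (postfix_ : List String) : String :=
  let suffix := if postfix_ ≠ [] then PySem.Str.join "-" (["", "_"] ++ postfix_) else ""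
  PySem.Str.join " " ((keepLastB classes).map (fun c => PySem.Str.replace c "." "-" ++ suffix))

-- ===== PRECONDITION & SPEC =====
def Spec_classes_to_css_classes (classes : List String) (postfix_ : List String) (out : String) : Prop := out = classes_to_css_classes_alt classes postfix_
instance (classes : List String) (postfix_ : List String) (out : String) : Decidable (Spec_classes_to_css_classes classes postfix_ out) := by unfold Spec_classes_to_css_classes; infer_instance

-- ===== CLAIM (what is proved, stated in full; the proofs are below) =====
def Claim_equal_classes_to_css_classes : Prop := ∀ (classes : List String) (postfix_ : List String), Dom_classes_to_css_classes classes postfix_ → Spec_classes_to_css_classes classes postfix_ (classes_to_css_classes classes postfix_)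

-- ===== LEMMAS AND PROOFS =====

theorem contains_discard (s : PySem.Set String) (cls x : String) :
    PySem.Set.contains (PySem.Set.discard s cls) x = (PySem.Set.contains s x && !(x == cls)) := by
  simp only [PySem.Set.contains_eq_listContains, PySem.Set.discard]
  cases hx : x == cls <;> cases hc : List.contains s x <;>
    simp_all [List.mem_filter]

theorem ofList_filter (p : String → Bool) (l : List String) :
    PySem.Set.ofList (l.filter p) = (PySem.Set.ofList l).filter p := by
  induction l with
  | nil => simp [PySem.Set.ofList_nil]
  | cons x t ih =>
    by_cases hp : p x = true
    · rw [List.filter_cons_of_pos hp, PySem.Set.ofList_cons, PySem.Set.ofList_cons,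
        List.filter_cons_of_pos hp, ih]
      simp only [PySem.Set.discard, List.filter_filter]
      exact congrArg _ (List.filter_congr (fun y _ => by rw [Bool.and_comm]))
    · have hp' : p x = false := by simpa using hp
      rw [List.filter_cons_of_neg (by simp [hp']), PySem.Set.ofList_cons,
        List.filter_cons_of_neg (by simp [hp']), ih]
      simp only [PySem.Set.discard, List.filter_filter]
      apply List.filter_congr
      intro y hy
      by_cases hyx : y = x
      · subst hyx; simp [hp']
      · simp [hyx]

theorem dedupLoopA_eq (l : List String) :
    ∀ (s : PySem.Set String) (res : List String),
      dedupLoopA l s res = res ++ PySem.Set.ofList (l.filter (fun x => PySem.Set.contains s x)) := by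
  induction l with
  | nil => intro s res; simp [dedupLoopA, PySem.Set.ofList_nil]
  | cons cls t ih =>
    intro s res
    by_cases h : PySem.Set.contains s cls = true
    · simp only [dedupLoopA, h, if_pos, ih, List.filter_cons_of_pos h, PySem.Set.ofList_cons]
      have hf : List.filter (fun x => PySem.Set.contains (PySem.Set.discard s cls) x) t
           = List.filter (fun y => !y == cls) (List.filter (fun x => PySem.Set.contains s x) t) := by
        rw [List.filter_filter]
        exact List.filter_congr (fun y _ => by rw [contains_discard, Bool.and_comm])
      rw [hf, ofList_filter]
      simp only [PySem.Set.discard, List.append_assoc, List.singleton_append]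
    · have h' : PySem.Set.contains s cls = false := by simpa using h
      simp only [dedupLoopA, h', Bool.false_eq_true, if_false, ih]
      rw [List.filter_cons_of_neg (by simpa using h)]

theorem length_ofList_eq_imp_nodup (l : List String) :
    (PySem.Set.ofList l).length = l.length → l.Nodup := by
  induction l with
  | nil => intro; simp
  | cons x t ih =>
    intro h
    rw [PySem.Set.ofList_cons] at h
    simp only [List.length_cons, PySem.Set.discard] at h
    have hle : (List.filter (fun y => !y == x) (PySem.Set.ofList t)).length ≤ (PySem.Set.ofList t).length :=
      List.length_filter_le _ _
    have hle2 : (PySem.Set.ofList t).length ≤ t.length := PySem.Set.length_ofList_le t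
    have hf : (List.filter (fun y => !y == x) (PySem.Set.ofList t)).length = (PySem.Set.ofList t).length := by omega
    have ht : (PySem.Set.ofList t).length = t.length := by omega
    have hall : ∀ y ∈ PySem.Set.ofList t, (!y == x) = true :=
      (List.length_filter_eq_length_iff).mp hf
    have hx : x ∉ t := by
      intro hmem
      have hmem' : x ∈ PySem.Set.ofList t := (PySem.Set.mem_ofList t x).mpr hmem
      have := hall x hmem'
      simp at this
    exact List.nodup_cons.mpr ⟨hx, ih ht⟩

-- B's forward keep-last scan equals reversed first-occurrence dedup of the reversed list
theorem keepLastB_eq (l : List String) :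
    keepLastB l = (PySem.Set.ofList l.reverse).reverse := by
  induction l with
  | nil => simp [keepLastB, PySem.Set.ofList_nil]
  | cons c rest ih =>
    rw [show (c :: rest).reverse = rest.reverse ++ [c] by simp,
      PySem.Set.ofList_append_singleton]
    by_cases h : c ∈ rest
    · have hmem : c ∈ PySem.Set.ofList rest.reverse := by simp [PySem.Set.mem_ofList, h]
      simp [keepLastB, h, PySem.Set.add, hmem, ih]
    · have hmem : c ∉ PySem.Set.ofList rest.reverse := by simp [PySem.Set.mem_ofList, h]
      simp [keepLastB, h, PySem.Set.add, hmem, ih]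

theorem dedup_list_eq (classes : List String) :
    (if PySem.Set.len (PySem.Set.ofList classes) ≠ (classes.length : Int) then
        (dedupLoopA classes.reverse (PySem.Set.ofList classes) []).reverse
      else classes)
    = keepLastB classes := by
  rw [keepLastB_eq]
  by_cases h : PySem.Set.len (PySem.Set.ofList classes) = (classes.length : Int)
  · have hlen : (PySem.Set.ofList classes).length = classes.length := by
      simpa [PySem.Set.len] using h
    have hnd : classes.Nodup := length_ofList_eq_imp_nodup classes hlen
    have hself : PySem.Set.ofList classes.reverse = classes.reverse :=
      PySem.Set.ofList_eq_self_of_nodup _ (by simpa using hnd)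
    rw [if_neg (by simpa using h), hself, List.reverse_reverse]
  · rw [if_pos h]
    rw [dedupLoopA_eq]
    have hfil : classes.reverse.filter (fun x => PySem.Set.contains (PySem.Set.ofList classes) x)
        = classes.reverse := by
      apply List.filter_eq_self.mpr
      intro a ha
      have ha' : a ∈ classes := by simpa using ha
      simp [PySem.Set.contains_eq_listContains, (PySem.Set.mem_ofList classes a).mpr ha']
    rw [hfil]
    simp

-- ===== VERDICT (by name: the statement is the Claim_ definition above) =====
theorem classes_to_css_classes_spec : Claim_equal_classes_to_css_classes := by
  intro classes postfix_ _
  unfold Spec_classes_to_css_classes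
  simp only [classes_to_css_classes, classes_to_css_classes_alt]
  rw [dedup_list_eq]
  by_cases hp : postfix_ = []
  · subst hp; rfl
  · simp [hp]
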